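-- pv_equiv track=rewrite | github.com/MxCDevGit/coursePyt | Эпизод 2. Основы/Задание 2.3/task.py | task_3
-- ===== SOURCE A (Python) =====
-- def task_3(str):
--     temp = ""
--     counter = 0
--     flag = 0
--
--     for i in str:
--         if flag == 1 and temp == i:
--             counter += 1
--         if i == ' ':
--             flag = 1
--         else:
--             temp = i
--             flag = 0
--
--     return counter
-- ===== SOURCE B (Python) =====
-- def task_3(str):
--     # B: tokenize on the literal space character, then compare adjacent word boundaries.
--     words = [w for w in str.split(' ') if w]
--     return sum(1 for a, b in zip(words, words[1:]) if a[-1] == b[0])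
-- ===== Notes on version B (the rewrite author's own statement) =====
-- stated objective: faster
-- what changed: Replaces A's per-character Python state machine (last-non-space char + after-space flag) with tokenize-then-compare: split on the literal space via the C-implemented str.split, drop empty tokens, and count adjacent word pairs whose boundary characters match.
import Mathlib
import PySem

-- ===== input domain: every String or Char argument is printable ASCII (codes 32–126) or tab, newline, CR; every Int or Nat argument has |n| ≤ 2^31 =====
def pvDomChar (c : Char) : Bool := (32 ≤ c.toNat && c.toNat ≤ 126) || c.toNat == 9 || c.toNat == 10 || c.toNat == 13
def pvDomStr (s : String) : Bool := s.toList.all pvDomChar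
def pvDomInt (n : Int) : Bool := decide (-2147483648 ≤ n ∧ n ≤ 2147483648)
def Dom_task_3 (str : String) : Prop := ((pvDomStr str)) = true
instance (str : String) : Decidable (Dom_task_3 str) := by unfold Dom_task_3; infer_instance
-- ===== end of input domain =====

-- B replaces A's char-by-char state machine with split-on-space + adjacent-boundary comparison (same O(n), measurably faster via C-level str.split); return value only, no mutation.


-- ===== PORT A =====
-- state = (temp, counter, flag); temp is Python's one-char-string buffer, modelled as List Char ("" = [])
def stepA (st : List Char × Int × Int) (i : Char) : List Char × Int × Int :=
  let counter := if st.2.2 = 1 ∧ st.1 = [i] then st.2.1 + 1 else st.2.1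
  if i = ' ' then (st.1, counter, 1) else ([i], counter, 0)

def task_3 (str : String) : Int :=
  (str.toList.foldl stepA ([], 0, 0)).2.1

-- ===== PORT B =====
-- str.split(' ') (single-char separator) ported as List.splitOn ' '; words[1:] is .tail;
-- a[-1] == b[0] on the nonempty filtered words is the Option comparison getLast? == head?.
def task_3_alt (str : String) : Int :=
  let words := (str.toList.splitOn ' ').filter (fun w => w ≠ [])
  ((words.zip words.tail).countP (fun p => p.1.getLast? == p.2.head?) : Int)

-- ===== PRECONDITION & SPEC =====
def Spec_task_3 (str : String) (out : Int) : Prop := out = task_3_alt str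
instance (str : String) (out : Int) : Decidable (Spec_task_3 str out) := by unfold Spec_task_3; infer_instance

-- ===== CLAIM (what is proved, stated in full; the proofs are below) =====
def Claim_equal_task_3 : Prop := ∀ (str : String), Dom_task_3 str → Spec_task_3 str (task_3 str)

-- ===== LEMMAS AND PROOFS =====

-- abstract state of A: o = last non-space char seen (none at start), gap = "previous char was a space"
def tempOf : Option Char → List Char
  | none => []
  | some t => [t]

-- the count A adds while scanning the rest of the string from abstract state (o, gap)
def pcount : Option Char → Bool → List Char → Int
  | _, _, [] => 0
  | o, gap, c :: cs =>
    if c = ' ' then pcount o true cs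
    else (if gap ∧ o = some c then 1 else 0) + pcount (some c) false cs

-- boundary comparison: previous word's last char vs next word's first char
def cmpO : Option Char → Option (List Char) → Int
  | some t, some (c :: _) => if t = c then 1 else 0
  | _, _ => 0

-- boundary-match count of a word list, threaded with the previous word's last char
def pairsP : Option Char → List (List Char) → Int
  | _, [] => 0
  | o, w :: ws => cmpO o (some w) + pairsP w.getLast? ws

theorem foldA_pcount (cs : List Char) : ∀ (o : Option Char) (counter : Int) (gap : Bool),
    o ≠ some ' ' →
    (cs.foldl stepA (tempOf o, counter, if gap then 1 else 0)).2.1 = counter + pcount o gap cs := by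
  induction cs with
  | nil => intro o counter gap _; simp [pcount]
  | cons c cs ih =>
    intro o counter gap ho
    by_cases hc : c = ' '
    · subst hc
      have htemp : (tempOf o = [' ']) = False := by
        cases o with
        | none => simp [tempOf]
        | some t =>
          simp only [tempOf, List.cons.injEq, and_true, eq_iff_iff, iff_false]
          intro h; exact ho (by rw [h])
      simp only [List.foldl_cons, stepA, htemp, and_false, if_false, pcount]
      have := ih o counter true ho
      simpa using this
    · have htemp : (tempOf o = [c]) ↔ (o = some c) := by
        cases o <;> simp [tempOf]
      simp only [List.foldl_cons, stepA, pcount, if_neg hc]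
      have hflag : ((if gap then (1:Int) else 0) = 1) ↔ (gap = true) := by
        cases gap <;> simp
      by_cases hm : gap = true ∧ o = some c
      · rw [if_pos ⟨hflag.mpr hm.1, htemp.mpr hm.2⟩]
        have := ih (some c) (counter + 1) false (by simp [hc])
        simp only [tempOf, if_neg (Bool.false_ne_true)] at this
        rw [this, if_pos hm]; ring
      · have hm' : ¬((if gap then (1:Int) else 0) = 1 ∧ tempOf o = [c]) := by
          intro ⟨h1, h2⟩; exact hm ⟨hflag.mp h1, htemp.mp h2⟩
        rw [if_neg hm']
        have := ih (some c) counter false (by simp [hc])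
        simp only [tempOf, if_neg (Bool.false_ne_true)] at this
        rw [this, if_neg (by exact_mod_cast hm)]; ring

theorem pcount_none_false_true (cs : List Char) :
    pcount none false cs = pcount none true cs := by
  induction cs with
  | nil => rfl
  | cons c cs ih =>
    by_cases hc : c = ' '
    · subst hc; simp [pcount]
    · simp [pcount, hc]

theorem getLast?_cons_or (c : Char) (l : List Char) :
    (c :: l).getLast? = l.getLast?.or (some c) := by
  cases l with
  | nil => rfl
  | cons b l =>
    rw [List.getLast?_cons_cons]
    cases h : (b :: l).getLast? with
    | none => exact absurd (List.getLast?_eq_none_iff.mp h) (List.cons_ne_nil b l)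
    | some t => rfl

theorem pcount_pairsP (cs : List Char) : ∀ (o : Option Char),
    pcount o true cs = pairsP o ((cs.splitOn ' ').filter (fun w => w ≠ [])) ∧
    pcount o false cs =
      pairsP (((cs.splitOn ' ').headI.getLast?).or o)
        (((cs.splitOn ' ').tail).filter (fun w => w ≠ [])) := by
  induction cs with
  | nil =>
    intro o
    simp [pcount, pairsP, List.splitOn_nil]
  | cons c cs ih =>
    intro o
    by_cases hc : c = ' '
    · subst hc
      have hsplit : (' ' :: cs).splitOn ' ' = [] :: cs.splitOn ' ' := by
        simp [List.splitOn, List.splitOnP_cons]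
      constructor
      · rw [hsplit]
        simpa [pcount] using (ih o).1
      · rw [hsplit]
        simpa [pcount, List.headI] using (ih o).1
    · obtain ⟨t0, rest, hS⟩ := List.exists_cons_of_ne_nil
        (show cs.splitOn ' ' ≠ [] from List.splitOnP_ne_nil _ _)
      have hS' : List.splitOnP (fun x => x == ' ') cs = t0 :: rest := hS
      have hsplit : (c :: cs).splitOn ' ' = (c :: t0) :: rest := by
        simp [List.splitOn, List.splitOnP_cons, hc, hS']
      have hfalse := (ih (some c)).2
      rw [hS] at hfalse
      simp only [List.headI, List.tail_cons] at hfalse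
      have hlast : (c :: t0).getLast? = t0.getLast?.or (some c) := getLast?_cons_or c t0
      have hcmp : cmpO o (some (c :: t0)) = if o = some c then 1 else 0 := by
        cases o with
        | none => simp [cmpO]
        | some t => simp [cmpO]
      constructor
      · rw [hsplit]
        simp only [pcount, if_neg hc]
        rw [List.filter_cons_of_pos (by simp), hfalse]
        simp only [pairsP, hcmp, hlast, true_and, false_and, if_false]
      · rw [hsplit]
        simp only [pcount, if_neg hc, List.headI, List.tail_cons, hlast]
        rw [hfalse]
        have hor : (t0.getLast?.or (some c)).or o = t0.getLast?.or (some c) := by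
          cases t0.getLast? <;> rfl
        rw [hor, if_neg (by simp), zero_add]

theorem pairsP_zipcount (ws : List (List Char)) : ∀ (o : Option Char),
    (∀ w ∈ ws, w ≠ []) →
    pairsP o ws =
      cmpO o ws.head? + ((ws.zip ws.tail).countP (fun p => p.1.getLast? == p.2.head?) : Int) := by
  induction ws with
  | nil => intro o _; simp [pairsP, cmpO]
  | cons w ws ih =>
    intro o hne
    have hw : w ≠ [] := hne w (by simp)
    have hrest : ∀ w' ∈ ws, w' ≠ [] := fun w' h => hne w' (by simp [h])
    simp only [pairsP, List.head?_cons]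
    rw [ih w.getLast? hrest]
    cases ws with
    | nil => simp [cmpO]
    | cons w' ws' =>
      have hw' : w' ≠ [] := hrest w' (by simp)
      obtain ⟨t, ht⟩ := Option.isSome_iff_exists.mp (List.getLast?_isSome.mpr hw)
      obtain ⟨ch, w'', hw'eq⟩ := List.exists_cons_of_ne_nil hw'
      subst hw'eq
      simp only [List.tail_cons, List.zip_cons_cons, List.countP_cons, List.head?_cons]
      have hcmp : cmpO w.getLast? (some (ch :: w'')) = if w.getLast? == some ch then 1 else 0 := by
        rw [ht]; simp only [cmpO, ht]
        by_cases h : t = ch <;> simp [h]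
      rw [hcmp]
      by_cases h : w.getLast? == some ch
      · simp only [if_pos h]
        push_cast
        ring
      · simp only [Bool.false_eq_true, if_neg h]
        push_cast
        ring

-- ===== VERDICT (by name: the statement is the Claim_ definition above) =====
theorem task_3_spec : Claim_equal_task_3 := by
  intro s _
  unfold Spec_task_3 task_3 task_3_alt
  have hA : (s.toList.foldl stepA ([], 0, 0)).2.1 = pcount none false s.toList := by
    have := foldA_pcount s.toList none 0 false (by simp)
    simpa [tempOf] using this
  rw [hA, pcount_none_false_true, (pcount_pairsP s.toList none).1]
  have hne : ∀ w ∈ (s.toList.splitOn ' ').filter (fun w => w ≠ []), w ≠ [] := by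
    intro w hw
    simpa using (List.mem_filter.mp hw).2
  rw [pairsP_zipcount _ none hne]
  cases h : ((s.toList.splitOn ' ').filter (fun w => w ≠ [])).head? with
  | none => simp [cmpO]
  | some w => cases w <;> simp [cmpO]
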